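-- pv_equiv track=rewrite | github.com/Dragonfire94/vedic-ai | backend/btr_engine.py | _check_house_triggers
-- ===== SOURCE A (Python) =====
-- from typing import List, Dict, Optional, Tuple, Any, Literal
--
-- def _check_house_triggers(chart: Dict, house_triggers: List[int]) -> bool:
--     """
--     하우스 트리거 확인
--     차트에서 해당 하우스에 행성이 배치되어 있는지 확인
--
--     Parameters:
--         chart: 차트 데이터 (planet_houses 포함)
--         house_triggers: 확인할 하우스 번호 리스트
--
--     Returns:
--         하우스 활성화 여부
--     """
--     if not house_triggers:
--         return False
--
--     planet_houses = chart.get("planet_houses", {})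
--     for house_num in house_triggers:
--         planets_in_house = [p for p, h in planet_houses.items() if h == house_num]
--         if planets_in_house:
--             return True
--     return False
-- ===== SOURCE B (Python) =====
-- def _check_house_triggers(chart, house_triggers):
--     if not house_triggers:
--         return False
--     triggers = set(house_triggers)
--     for h in chart.get("planet_houses", {}).values():
--         if h in triggers:
--             return True
--     return False
-- ===== Notes on version B (the rewrite author's own statement) =====
-- stated objective: simpler
-- what changed: Inverts the nested traversal: instead of looping over triggers and rebuilding a list of matching planets per trigger, B builds a set of triggers once and makes a single pass over the planet houses with a membership test.
import Mathlib
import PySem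

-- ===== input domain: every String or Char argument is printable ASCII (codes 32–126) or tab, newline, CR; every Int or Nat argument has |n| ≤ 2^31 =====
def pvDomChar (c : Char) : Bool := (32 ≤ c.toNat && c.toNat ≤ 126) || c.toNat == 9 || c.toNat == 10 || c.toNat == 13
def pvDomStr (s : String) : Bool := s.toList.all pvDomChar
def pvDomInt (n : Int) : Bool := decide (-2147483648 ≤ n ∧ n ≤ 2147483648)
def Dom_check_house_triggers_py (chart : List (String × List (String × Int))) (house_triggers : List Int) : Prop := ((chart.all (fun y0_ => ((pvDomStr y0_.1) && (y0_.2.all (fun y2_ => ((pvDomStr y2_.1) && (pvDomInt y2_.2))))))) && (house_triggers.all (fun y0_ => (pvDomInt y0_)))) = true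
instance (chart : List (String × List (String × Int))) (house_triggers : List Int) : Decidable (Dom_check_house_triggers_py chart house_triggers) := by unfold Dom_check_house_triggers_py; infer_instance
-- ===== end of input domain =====

-- B inverts A's nested traversal: a set of triggers built once, then a single pass over the planet houses (simpler; same boolean on every input).


-- ===== PORT A =====
-- for house_num in house_triggers: planets_in_house = [p for p, h in planet_houses.items() if h == house_num]; if planets_in_house: return True
def chtALoop (planet_houses : List (String × Int)) : List Int → Bool
  | [] => false
  | house_num :: rest =>
      let planets_in_house :=
        ((planet_houses.filter (fun ph => ph.2 == house_num)).map (fun ph => ph.1))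
      if planets_in_house ≠ [] then true else chtALoop planet_houses rest

def check_house_triggers_py (chart : List (String × List (String × Int))) (house_triggers : List Int) : Bool :=
  if house_triggers = [] then false
  else
    let planet_houses := (PySem.Dict.mk chart).getD "planet_houses" []
    chtALoop planet_houses house_triggers

-- ===== PORT B =====
-- triggers = set(house_triggers); for h in planet_houses.values(): if h in triggers: return True
def chtBLoop (triggers : PySem.Set Int) : List Int → Bool
  | [] => false
  | h :: rest => if PySem.Set.contains triggers h then true else chtBLoop triggers rest

def check_house_triggers_py_alt (chart : List (String × List (String × Int))) (house_triggers : List Int) : Bool :=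
  if house_triggers = [] then false
  else
    let triggers := PySem.Set.ofList house_triggers
    chtBLoop triggers (((PySem.Dict.mk chart).getD "planet_houses" []).map (fun ph => ph.2))

-- ===== PRECONDITION & SPEC =====
def Spec_check_house_triggers_py (chart : List (String × List (String × Int))) (house_triggers : List Int) (out : Bool) : Prop := out = check_house_triggers_py_alt chart house_triggers
instance (chart : List (String × List (String × Int))) (house_triggers : List Int) (out : Bool) : Decidable (Spec_check_house_triggers_py chart house_triggers out) := by unfold Spec_check_house_triggers_py; infer_instance

-- ===== CLAIM (what is proved, stated in full; the proofs are below) =====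
def Claim_equal_check_house_triggers_py : Prop := ∀ (chart : List (String × List (String × Int))) (house_triggers : List Int), Dom_check_house_triggers_py chart house_triggers → Spec_check_house_triggers_py chart house_triggers (check_house_triggers_py chart house_triggers)

-- ===== LEMMAS AND PROOFS =====
theorem chtALoop_eq (ph : List (String × Int)) (hs : List Int) :
    chtALoop ph hs = hs.any (fun hn => ph.any (fun p => p.2 == hn)) := by
  induction hs with
  | nil => rfl
  | cons hn rest ih =>
      simp only [chtALoop, List.any_cons, ih]
      have key : (((ph.filter (fun p => p.2 == hn)).map (fun p => p.1)) ≠ []) ↔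
          (ph.any (fun p => p.2 == hn) = true) := by
        simp [List.filter_eq_nil_iff, List.any_eq_true]
      by_cases h : ph.any (fun p => p.2 == hn) <;> simp_all

theorem chtBLoop_eq (t : PySem.Set Int) (vs : List Int) :
    chtBLoop t vs = vs.any (fun h => PySem.Set.contains t h) := by
  induction vs with
  | nil => rfl
  | cons h rest ih =>
      simp only [chtBLoop, List.any_cons, ih]
      by_cases hc : PySem.Set.contains t h <;> simp_all

theorem cht_swap_any (ph : List (String × Int)) (hs : List Int) :
    hs.any (fun hn => ph.any (fun p => p.2 == hn)) =
      ph.any (fun p => PySem.Set.contains (PySem.Set.ofList hs) p.2) := by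
  rw [Bool.eq_iff_iff]
  simp [List.any_eq_true, PySem.Set.contains, PySem.Set.mem_ofList]
  tauto

-- ===== VERDICT (by name: the statement is the Claim_ definition above) =====
theorem check_house_triggers_py_spec : Claim_equal_check_house_triggers_py := by
  intro chart hts _
  unfold Spec_check_house_triggers_py check_house_triggers_py check_house_triggers_py_alt
  by_cases h0 : hts = []
  · simp [h0]
  · simp only [h0, if_false]
    rw [chtALoop_eq, chtBLoop_eq, List.any_map]
    exact cht_swap_any _ _
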